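-- pv_equiv track=rewrite | github.com/ntua-el18431/Introduction-to-Artifical-Intelligence-DTU | Belief Revision/Postulates.py | dictionary_filler
-- ===== SOURCE A (Python) =====
-- def dictionary_filler(set_of_dict_1,set_of_dict_2):              #used in consequence set to help with the comparison of two lists of dictionaries by filling the dictionaries of one list with the keys missing
--     keys_1 = set_of_dict_1[0].keys()                             #take the keys of the first list of dicts
--     keys_2 = set_of_dict_2[0].keys()                             #take the keys of the second list of dicts
--     for key in keys_1:                                           #for every key in the first list
--         helper_list = []
--         if key not in keys_2:                                    #if it is not in the second list
--             for i in set_of_dict_2:                              #create a copy of the second list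
--                 helper_list.append(i.copy())
--             for dict in range(len(set_of_dict_2)):
--                 set_of_dict_2[dict][key] = True                  #in the original copy, add the the key with True value in every dictionary
--                 helper_list[dict][key] = False                   #in the copy, add the key with the False value in every dictionary
--             set_of_dict_2 = set_of_dict_2 + helper_list          #merge the two lists
--
--     return set_of_dict_2
-- ===== SOURCE B (Python) =====
-- def _bool_tuples(n):
--     ts = [()]
--     for _ in range(n):
--         ts = [(b,) + t for b in (True, False) for t in ts]
--     return ts
--
-- def dictionary_filler(set_of_dict_1, set_of_dict_2):
--     missing = [k for k in set_of_dict_1[0] if k not in set_of_dict_2[0]]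
--     result = []
--     for bits in _bool_tuples(len(missing)):
--         for d in set_of_dict_2:
--             new = d.copy()
--             for k, v in zip(missing, reversed(bits)):
--                 new[k] = v
--             result.append(new)
--     return result
-- ===== Notes on version B (the rewrite author's own statement) =====
-- stated objective: alternative
-- what changed: Instead of A's repeated doubling of the dict list (copy the whole list and append it once per missing key, mutating as it goes), B collects the missing keys once, enumerates all 2^m True/False assignments (last key slowest, True before False) and builds each output dict directly from an original dict plus its assignment; B does not mutate the caller's dicts.
import Mathlib
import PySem

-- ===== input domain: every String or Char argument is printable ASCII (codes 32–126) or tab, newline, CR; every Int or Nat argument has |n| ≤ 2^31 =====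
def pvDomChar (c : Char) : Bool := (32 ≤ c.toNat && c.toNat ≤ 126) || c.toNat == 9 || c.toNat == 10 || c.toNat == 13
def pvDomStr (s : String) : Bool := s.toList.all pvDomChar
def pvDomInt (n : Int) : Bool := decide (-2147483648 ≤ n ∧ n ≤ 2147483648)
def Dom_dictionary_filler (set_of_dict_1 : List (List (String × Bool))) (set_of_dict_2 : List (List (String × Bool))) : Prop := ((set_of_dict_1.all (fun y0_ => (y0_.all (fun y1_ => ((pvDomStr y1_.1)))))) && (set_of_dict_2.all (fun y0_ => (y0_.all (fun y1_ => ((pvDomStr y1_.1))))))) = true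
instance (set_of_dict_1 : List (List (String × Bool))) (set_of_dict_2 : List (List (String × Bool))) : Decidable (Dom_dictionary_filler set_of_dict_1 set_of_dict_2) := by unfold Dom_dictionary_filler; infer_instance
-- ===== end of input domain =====

-- B replaces A's repeated in-place doubling of the dict list by a direct enumeration of all
-- 2^m True/False assignments of the missing keys (alternative decomposition, same cost).
-- Python A mutates the caller's dicts (sets the missing keys to True in them); B does not —
-- the equivalence proved here is about the RETURN value only.

-- d[k] = v on an insertion-ordered dict represented as an association list (shared helper)
def pySetItem (d : List (String × Bool)) (k : String) (v : Bool) : List (String × Bool) :=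
  (PySem.Dict.insert ⟨d⟩ k v).items

-- ===== PORT A =====
def dictionary_filler (set_of_dict_1 : List (List (String × Bool))) (set_of_dict_2 : List (List (String × Bool))) : List (List (String × Bool)) :=
  let keys_1 := (set_of_dict_1.headD []).map Prod.fst
  keys_1.foldl (fun s key =>
    -- keys_2 is a live view of the first dict of set_of_dict_2, which stays at index 0
    -- of s and accumulates the keys added so far: read it from the current state.
    let keys_2 := (s.headD []).map Prod.fst
    if keys_2.contains key then s
    else
      let helper_list := s.map (fun d => pySetItem d key false)
      let s' := s.map (fun d => pySetItem d key true)
      s' ++ helper_list) set_of_dict_2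

-- ===== PORT B =====
-- _bool_tuples in Source B: all 2^n Bool tuples, first component slowest, True before False
def boolTuples (n : Nat) : List (List Bool) :=
  (List.range n).foldl (fun ts _ => [true, false].flatMap (fun b => ts.map (fun t => b :: t))) [[]]

def dictionary_filler_alt (set_of_dict_1 : List (List (String × Bool))) (set_of_dict_2 : List (List (String × Bool))) : List (List (String × Bool)) :=
  let missing := ((set_of_dict_1.headD []).map Prod.fst).filter
      (fun k => !(((set_of_dict_2.headD []).map Prod.fst).contains k))
  (boolTuples missing.length).flatMap (fun bits =>
    set_of_dict_2.map (fun d =>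
      (missing.zip bits.reverse).foldl (fun d kv => pySetItem d kv.1 kv.2) d))

-- ===== PRECONDITION & SPEC =====
-- Pre_ excludes empty argument lists, on which Python A raises IndexError, and association
-- lists with duplicate keys (in set_of_dict_1's first dict or in any dict of set_of_dict_2),
-- which cannot arise from Python dicts (Python collapses the duplicates at construction).
def Pre_dictionary_filler (set_of_dict_1 : List (List (String × Bool))) (set_of_dict_2 : List (List (String × Bool))) : Prop :=
  set_of_dict_1 ≠ [] ∧ set_of_dict_2 ≠ [] ∧
  ((set_of_dict_1.headD []).map Prod.fst).Nodup ∧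
  ∀ d ∈ set_of_dict_2, (d.map Prod.fst).Nodup
instance (set_of_dict_1 : List (List (String × Bool))) (set_of_dict_2 : List (List (String × Bool))) : Decidable (Pre_dictionary_filler set_of_dict_1 set_of_dict_2) := by unfold Pre_dictionary_filler; infer_instance

def pvWitness_dictionary_filler : (List (List (String × Bool))) × (List (List (String × Bool))) :=
  ([[("a", true), ("b", false)]], [[("b", true)], [("b", false), ("c", true)]])

def Spec_dictionary_filler (set_of_dict_1 : List (List (String × Bool))) (set_of_dict_2 : List (List (String × Bool))) (out : List (List (String × Bool))) : Prop := out = dictionary_filler_alt set_of_dict_1 set_of_dict_2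
instance (set_of_dict_1 : List (List (String × Bool))) (set_of_dict_2 : List (List (String × Bool))) (out : List (List (String × Bool))) : Decidable (Spec_dictionary_filler set_of_dict_1 set_of_dict_2 out) := by unfold Spec_dictionary_filler; infer_instance

-- ===== CLAIM (what is proved, stated in full; the proofs are below) =====
def Claim_equal_dictionary_filler : Prop := ∀ (set_of_dict_1 : List (List (String × Bool))) (set_of_dict_2 : List (List (String × Bool))), Dom_dictionary_filler set_of_dict_1 set_of_dict_2 → Pre_dictionary_filler set_of_dict_1 set_of_dict_2 → Spec_dictionary_filler set_of_dict_1 set_of_dict_2 (dictionary_filler set_of_dict_1 set_of_dict_2)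

-- ===== LEMMAS AND PROOFS =====

-- one doubling step: every dict with key ↦ true, then every dict with key ↦ false
def pvStep (k : String) (s : List (List (String × Bool))) : List (List (String × Bool)) :=
  s.map (fun d => pySetItem d k true) ++ s.map (fun d => pySetItem d k false)

-- keys of the head dict of the current state
def pvHK (s : List (List (String × Bool))) : List String := (s.headD []).map Prod.fst

theorem pvKeys_setItem_of_not_mem (d : List (String × Bool)) (k : String) (v : Bool)
    (h : (d.map Prod.fst).contains k = false) :
    (pySetItem d k v).map Prod.fst = d.map Prod.fst ++ [k] := by
  have hm : k ∉ d.map Prod.fst := by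
    intro hmem; rw [← List.contains_iff_mem] at hmem; rw [h] at hmem; cases hmem
  have hc : (PySem.Dict.mk d : PySem.Dict String Bool).contains k = false := by
    rw [PySem.Dict.contains_mk, List.any_eq_false]
    intro p hp
    simp only [beq_iff_eq]
    exact fun e => hm (List.mem_map.mpr ⟨p, hp, e⟩)
  unfold pySetItem
  rw [PySem.Dict.items_insert_of_not_contains _ _ hc]
  simp

theorem pvStep_ne_nil (k : String) (s : List (List (String × Bool))) (hs : s ≠ []) :
    pvStep k s ≠ [] := by
  cases s with
  | nil => exact absurd rfl hs
  | cons d t => simp [pvStep]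

theorem pvHK_step (s : List (List (String × Bool))) (k : String) (hs : s ≠ [])
    (h : (pvHK s).contains k = false) : pvHK (pvStep k s) = pvHK s ++ [k] := by
  cases s with
  | nil => exact absurd rfl hs
  | cons d t =>
    simp only [pvHK, List.headD_cons] at h ⊢
    simp only [pvStep, List.map_cons, List.cons_append, List.headD_cons]
    exact pvKeys_setItem_of_not_mem d k true h

theorem pvA_fold_eq (ks : List String) (s : List (List (String × Bool)))
    (hs : s ≠ []) (hnd : ks.Nodup) :
    ks.foldl (fun s key =>
      let keys_2 := (s.headD []).map Prod.fst
      if keys_2.contains key then s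
      else
        let helper_list := s.map (fun d => pySetItem d key false)
        let s' := s.map (fun d => pySetItem d key true)
        s' ++ helper_list) s
    = (ks.filter (fun k => !(pvHK s).contains k)).foldl (fun s k => pvStep k s) s := by
  induction ks generalizing s with
  | nil => rfl
  | cons k ks ih =>
    obtain ⟨hk, hnd'⟩ := List.nodup_cons.mp hnd
    simp only [List.foldl_cons, List.filter_cons]
    by_cases hc : ((s.headD []).map Prod.fst).contains k = true
    · rw [if_pos hc]
      have hf : (!(pvHK s).contains k) = false := by simp only [pvHK, hc, Bool.not_true]
      rw [hf]
      simp only [Bool.false_eq_true, if_false]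
      exact ih s hs hnd'
    · have hc' : ((s.headD []).map Prod.fst).contains k = false := by
        cases hb : ((s.headD []).map Prod.fst).contains k
        · rfl
        · exact absurd hb hc
      rw [if_neg hc]
      have hf : (!(pvHK s).contains k) = true := by simp only [pvHK, hc', Bool.not_false]
      rw [hf]
      simp only [if_true, List.foldl_cons]
      have hbody : (s.map (fun d => pySetItem d k true) ++ s.map (fun d => pySetItem d k false))
          = pvStep k s := rfl
      rw [hbody, ih (pvStep k s) (pvStep_ne_nil k s hs) hnd']
      congr 1
      apply List.filter_congr
      intro x hx
      rw [pvHK_step s k hs (by simpa [pvHK] using hc')]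
      have hxk : (x == k) = false := by
        simp only [beq_eq_false_iff_ne, ne_eq]
        exact fun e => hk (e ▸ hx)
      simp only [List.contains_append, List.contains_cons, List.contains_nil, hxk, Bool.or_false]

theorem pvBoolTuples_succ (n : Nat) :
    boolTuples (n + 1)
      = (boolTuples n).map (fun t => true :: t) ++ (boolTuples n).map (fun t => false :: t) := by
  simp [boolTuples, List.range_succ]

theorem pvLength_mem_boolTuples (n : Nat) (r : List Bool) (h : r ∈ boolTuples n) : r.length = n := by
  induction n generalizing r with
  | zero =>
    simp only [boolTuples, List.range_zero, List.foldl_nil, List.mem_singleton] at h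
    simp [h]
  | succ n ih =>
    rw [pvBoolTuples_succ] at h
    rcases List.mem_append.mp h with h' | h' <;>
      · obtain ⟨t, ht, rfl⟩ := List.mem_map.mp h'
        simp [ih t ht]

theorem pvExpand_eq_foldl (m : List String) (s : List (List (String × Bool))) :
    (boolTuples m.length).flatMap (fun bits =>
      s.map (fun d => (m.zip bits.reverse).foldl (fun d kv => pySetItem d kv.1 kv.2) d))
    = m.foldl (fun s k => pvStep k s) s := by
  induction m using List.reverseRecOn with
  | nil => simp [boolTuples]
  | append_singleton m k ih =>
    rw [List.foldl_append, List.foldl_cons, List.foldl_nil]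
    have hlen : (m ++ [k]).length = m.length + 1 := by simp
    rw [hlen, pvBoolTuples_succ, List.flatMap_append, List.flatMap_map, List.flatMap_map]
    have key : ∀ (b : Bool) (r : List Bool), r ∈ boolTuples m.length →
        (s.map (fun d => ((m ++ [k]).zip (b :: r).reverse).foldl
            (fun d kv => pySetItem d kv.1 kv.2) d))
        = (s.map (fun d => (m.zip r.reverse).foldl (fun d kv => pySetItem d kv.1 kv.2) d)).map
            (fun d => pySetItem d k b) := by
      intro b r hr
      rw [List.map_map]
      apply List.map_congr_left
      intro d _
      have hzip : (m ++ [k]).zip ((b :: r).reverse) = m.zip r.reverse ++ [(k, b)] := by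
        rw [List.reverse_cons, List.zip_append (by simp [pvLength_mem_boolTuples _ _ hr])]
        rfl
      rw [hzip, List.foldl_append, List.foldl_cons, List.foldl_nil]
      rfl
    rw [List.flatMap_congr (fun r hr => key true r hr),
        List.flatMap_congr (fun r hr => key false r hr),
        ← List.map_flatMap, ← List.map_flatMap, ih]
    rfl

-- ===== VERDICT (by name: the statement is the Claim_ definition above) =====
theorem dictionary_filler_spec : Claim_equal_dictionary_filler := by
  intro set_of_dict_1 set_of_dict_2 _ hpre
  obtain ⟨h1, h2, hnd, -⟩ := hpre
  show dictionary_filler set_of_dict_1 set_of_dict_2 = dictionary_filler_alt set_of_dict_1 set_of_dict_2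
  simp only [dictionary_filler, dictionary_filler_alt]
  rw [pvA_fold_eq _ _ h2 hnd, ← pvExpand_eq_foldl]
  simp only [pvHK]
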